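-- pv_equiv track=rewrite | github.com/ChidexWorld/ai-resume-server | app/services/resume_analyzer.py | _extract_languages_from_text
-- ===== SOURCE A (Python) =====
-- def _extract_languages_from_text(text: str) -> list:
--     """Extract languages from text sections and language lists."""
--     languages = []
--     lines = text.split('\n')
--
--     # Common languages to look for
--     language_list = [
--         'english', 'spanish', 'french', 'german', 'italian', 'portuguese',
--         'chinese', 'mandarin', 'japanese', 'korean', 'arabic', 'russian',
--         'hindi', 'dutch', 'swedish', 'norwegian', 'danish', 'polish'
--     ]
--
--     text_lower = text.lower()
--
--     # Method 1: Look for explicit language mentions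
--     for lang in language_list:
--         if lang in text_lower:
--             languages.append(lang.title())
--
--     # Method 2: Look for "Languages" section
--     for i, line in enumerate(lines):
--         line_lower = line.lower().strip()
--         if line_lower == 'languages' or line_lower == 'language':
--             # Check next few lines for language names
--             for j in range(i+1, min(i+5, len(lines))):
--                 next_line = lines[j].strip()
--                 if len(next_line) > 1 and len(next_line) < 20:
--                     next_line_lower = next_line.lower()
--                     if next_line_lower in language_list:
--                         languages.append(next_line.title())
--                     # Also check for common language patterns
--                     elif any(lang in next_line_lower for lang in language_list):
--                         for lang in language_list:
--                             if lang in next_line_lower: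
--                                 languages.append(lang.title())
--             break
--
--     return list(set(languages))  # Remove duplicates
-- ===== SOURCE B (Python) =====
-- def _extract_languages_from_text(text: str) -> list:
--     """Extract languages: one recursive scan over a (lowercase, Title) pair table."""
--     pairs = [
--         ('english', 'English'), ('spanish', 'Spanish'), ('french', 'French'),
--         ('german', 'German'), ('italian', 'Italian'), ('portuguese', 'Portuguese'),
--         ('chinese', 'Chinese'), ('mandarin', 'Mandarin'), ('japanese', 'Japanese'),
--         ('korean', 'Korean'), ('arabic', 'Arabic'), ('russian', 'Russian'),
--         ('hindi', 'Hindi'), ('dutch', 'Dutch'), ('swedish', 'Swedish'),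
--         ('norwegian', 'Norwegian'), ('danish', 'Danish'), ('polish', 'Polish')
--     ]
--     t = text.lower()
--     found = set()
--     for low, name in pairs:
--         if low in t:
--             found.add(name)
--     return list(found)
-- ===== Notes on version B (the rewrite author's own statement) =====
-- stated objective: simpler
-- what changed: B replaces A's two-method scan (a substring pass calling .title() plus a line-splitting section-header search with a nested range loop) by a single accumulator loop over a precomputed (lowercase, Title) pair table; the second method is redundant because every name it can add occurs as a substring of the lowered text and is already found by the substring pass.
import Mathlib
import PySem

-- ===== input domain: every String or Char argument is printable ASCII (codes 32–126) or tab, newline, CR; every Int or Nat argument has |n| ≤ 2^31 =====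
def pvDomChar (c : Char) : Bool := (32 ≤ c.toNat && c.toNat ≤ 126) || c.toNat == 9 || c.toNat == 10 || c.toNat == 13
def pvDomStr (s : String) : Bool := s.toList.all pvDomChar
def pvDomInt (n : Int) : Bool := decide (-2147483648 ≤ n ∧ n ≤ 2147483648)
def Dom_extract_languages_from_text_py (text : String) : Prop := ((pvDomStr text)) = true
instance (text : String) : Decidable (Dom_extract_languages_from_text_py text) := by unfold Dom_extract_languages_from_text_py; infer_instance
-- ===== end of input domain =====

-- B drops A's redundant "Languages"-section scan (Method 2) and replaces the whole pipeline
-- by one recursive scan over a precomputed (lowercase, Title) pair table with a set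
-- accumulator; simpler, same return value (list(set(...)) is ported order-independently).

-- ===== PORT A =====
def pvLangs : List String :=
  ["english", "spanish", "french", "german", "italian", "portuguese",
   "chinese", "mandarin", "japanese", "korean", "arabic", "russian",
   "hindi", "dutch", "swedish", "norwegian", "danish", "polish"]

-- Python str.title(), ported by hand (PySem has no title): a letter after a non-letter is
-- uppercased, any other letter lowercased, non-letters unchanged; exact on ASCII, where
-- Python's "cased"/letter character classes are exactly a-z/A-Z.
def pvTitleChars : List Char → Bool → List Char
  | [], _ => []
  | c :: cs, prevAlpha =>
      (if prevAlpha then PySem.Chars.lowerChar c else PySem.Chars.upperChar c)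
        :: pvTitleChars cs (PySem.Chars.isalpha c)

def pvTitle (s : String) : String := String.ofList (pvTitleChars s.toList false)

-- Method 1: for lang in language_list: if lang in text_lower: languages.append(lang.title())
def pvMethod1 (text_lower : String) : List String :=
  pvLangs.foldl (fun acc lang =>
    if PySem.Str.isIn lang text_lower then acc ++ [pvTitle lang] else acc) []

-- body of the inner 'for j in range(i+1, min(i+5, len(lines)))' loop: the appends made for
-- one j (next_line = lines[j].strip(), next_line_lower = next_line.lower(), written inline)
def pvInnerBody (lines : List String) (j : Int) : List String :=
  if 1 < PySem.Str.len (PySem.Str.strip (PySem.List.pyGetD lines j "")) ∧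
      PySem.Str.len (PySem.Str.strip (PySem.List.pyGetD lines j "")) < 20 then
    if PySem.Str.lower (PySem.Str.strip (PySem.List.pyGetD lines j "")) ∈ pvLangs then
      [pvTitle (PySem.Str.strip (PySem.List.pyGetD lines j ""))]
    else if pvLangs.any (fun lang =>
        PySem.Str.isIn lang (PySem.Str.lower (PySem.Str.strip (PySem.List.pyGetD lines j "")))) then
      pvLangs.foldl (fun acc lang =>
        if PySem.Str.isIn lang (PySem.Str.lower (PySem.Str.strip (PySem.List.pyGetD lines j ""))) then
          acc ++ [pvTitle lang]
        else acc) []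
    else []
  else []

-- the inner loop run after a header at index i
def pvMethod2At (lines : List String) (i : Nat) : List String :=
  (PySem.List.pyRange ((i : Int) + 1) (min ((i : Int) + 5) (lines.length : Int))).foldl
    (fun acc j => acc ++ pvInnerBody lines j) []

-- Method 2: scan enumerate(lines) for a 'languages'/'language' header; break after the first
-- (line_lower = line.lower().strip(), written inline)
def pvMethod2 (lines : List String) : List String → Nat → List String
  | [], _ => []
  | line :: rest, i =>
      if PySem.Str.strip (PySem.Str.lower line) = "languages" ∨
          PySem.Str.strip (PySem.Str.lower line) = "language" then pvMethod2At lines i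
      else pvMethod2 lines rest (i + 1)

def extract_languages_from_text_py (text : String) : List String :=
  let lines := (PySem.Str.split? text "\n").getD []   -- sep "\n" ≠ "": split? is never none
  let text_lower := PySem.Str.lower text
  PySem.Set.ofList (pvMethod1 text_lower ++ pvMethod2 lines lines 0)

-- ===== PORT B =====
-- the precomputed (lowercase, Title) pair table of Source B
def pvPairs : List (String × String) :=
  [("english", "English"), ("spanish", "Spanish"), ("french", "French"),
   ("german", "German"), ("italian", "Italian"), ("portuguese", "Portuguese"),
   ("chinese", "Chinese"), ("mandarin", "Mandarin"), ("japanese", "Japanese"),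
   ("korean", "Korean"), ("arabic", "Arabic"), ("russian", "Russian"),
   ("hindi", "Hindi"), ("dutch", "Dutch"), ("swedish", "Swedish"),
   ("norwegian", "Norwegian"), ("danish", "Danish"), ("polish", "Polish")]

-- for low, name in pairs: if low in t: found.add(name)  — structural recursion on the table
def pvScan (t : String) : List (String × String) → PySem.Set String → List String
  | [], found => found
  | (low, name) :: rest, found =>
      pvScan t rest (if PySem.Str.isIn low t then PySem.Set.add found name else found)

def extract_languages_from_text_py_alt (text : String) : List String :=
  pvScan (PySem.Str.lower text) pvPairs PySem.Set.empty

-- ===== PRECONDITION & SPEC =====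
def Spec_extract_languages_from_text_py (text : String) (out : List String) : Prop := out = extract_languages_from_text_py_alt text
instance (text : String) (out : List String) : Decidable (Spec_extract_languages_from_text_py text out) := by unfold Spec_extract_languages_from_text_py; infer_instance

-- ===== CLAIM (what is proved, stated in full; the proofs are below) =====
def Claim_equal_extract_languages_from_text_py : Prop := ∀ (text : String), Dom_extract_languages_from_text_py text → Spec_extract_languages_from_text_py text (extract_languages_from_text_py text)

-- ===== LEMMAS AND PROOFS =====

-- ASCII character facts used for title∘lower = title (checked by decide on codes < 128)
lemma pvCharFacts : ∀ n, n < 128 →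
    (PySem.Chars.isalpha (PySem.Chars.lowerChar (Char.ofNat n)) = PySem.Chars.isalpha (Char.ofNat n)
    ∧ PySem.Chars.upperChar (PySem.Chars.lowerChar (Char.ofNat n)) = PySem.Chars.upperChar (Char.ofNat n)
    ∧ PySem.Chars.lowerChar (PySem.Chars.lowerChar (Char.ofNat n)) = PySem.Chars.lowerChar (Char.ofNat n)) := by
  decide

lemma pvTitleChars_lower (l : List Char) (h : ∀ c ∈ l, c.toNat < 128) (b : Bool) :
    pvTitleChars (PySem.Chars.lower l) b = pvTitleChars l b := by
  induction l generalizing b with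
  | nil => simp [PySem.Chars.lower, pvTitleChars]
  | cons c cs ih =>
      have hc : c.toNat < 128 := h c (by simp)
      obtain ⟨h1, h2, h3⟩ := pvCharFacts c.toNat hc
      rw [Char.ofNat_toNat] at h1 h2 h3
      simp only [PySem.Chars.lower, List.map_cons, pvTitleChars, h1, h2, h3]
      rw [← PySem.Chars.lower]
      rw [ih (fun x hx => h x (by simp [hx]))]

lemma pvTitle_lower (s : String) (h : ∀ c ∈ s.toList, c.toNat < 128) :
    pvTitle (PySem.Str.lower s) = pvTitle s := by
  unfold pvTitle
  rw [PySem.Str.toList_lower, pvTitleChars_lower s.toList h]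

-- every piece produced by Chars.splitOn.go is an infix of the original string
lemma pvSplitOnGo_infix (sep : List Char) :
    ∀ (fuel : Nat) (l cur : List Char) (acc : List (List Char)) (orig : List Char),
      cur.reverse ++ l <:+: orig → (∀ a ∈ acc, a <:+: orig) →
      ∀ p ∈ PySem.Chars.splitOn.go sep fuel l cur acc, p <:+: orig := by
  intro fuel
  induction fuel with
  | zero =>
      intro l cur acc orig h1 h2 p hp
      simp only [PySem.Chars.splitOn.go, List.mem_reverse, List.mem_cons] at hp
      rcases hp with h | h
      · exact h ▸ h1
      · exact h2 p h
  | succ n ih =>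
      intro l cur acc orig h1 h2 p hp
      cases l with
      | nil =>
          simp only [PySem.Chars.splitOn.go, List.mem_reverse, List.mem_cons] at hp
          rcases hp with h | h
          · subst h
            simpa using h1
          · exact h2 p h
      | cons c rest =>
          simp only [PySem.Chars.splitOn.go] at hp
          split at hp
          · refine ih _ [] (cur.reverse :: acc) orig ?_ ?_ p hp
            · have hsuffix : List.drop sep.length (c :: rest) <:+ (c :: rest) := List.drop_suffix _ _
              have hcr : (c :: rest) <:+: orig :=
                ((List.suffix_append cur.reverse (c :: rest)).isInfix).trans h1
              simpa using List.IsInfix.trans hsuffix.isInfix hcr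
            · intro a ha
              rcases List.mem_cons.mp ha with h | h
              · subst h
                exact ((List.prefix_append cur.reverse (c :: rest)).isInfix).trans h1
              · exact h2 a h
          · refine ih rest (c :: cur) acc orig ?_ h2 p hp
            simpa using h1

lemma pvSplitOn_infix (s sep : List Char) (p : List Char) (hp : p ∈ PySem.Chars.splitOn s sep) :
    p <:+: s := by
  unfold PySem.Chars.splitOn at hp
  exact pvSplitOnGo_infix sep (s.length + 1) s [] [] s (by simp) (by simp) p hp

-- characterisation of Method 1
lemma pvMethod1_eq (tl : String) :
    pvMethod1 tl = (pvLangs.filter (fun lang => PySem.Str.isIn lang tl)).map pvTitle := by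
  unfold pvMethod1
  rw [PySem.List.foldl_append_if]
  simp

lemma pvMem_method1 {x : String} {tl : String}
    (lang : String) (hmem : lang ∈ pvLangs) (hin : PySem.Str.isIn lang tl = true)
    (hx : x = pvTitle lang) : x ∈ pvMethod1 tl := by
  rw [pvMethod1_eq]
  exact List.mem_map.mpr ⟨lang, List.mem_filter.mpr ⟨hmem, hin⟩, hx.symm⟩

-- every element appended by the inner loop body comes from a language occurring (lowercased)
-- inside one of the lines
set_option maxHeartbeats 1000000 in
lemma pvMem_innerBody {lines : List String} {j : Int} {x : String}
    (hlo : 0 ≤ j) (hhi : j < (lines.length : Int))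
    (hd : ∀ s ∈ lines, ∀ c ∈ s.toList, c.toNat < 128)
    (hx : x ∈ pvInnerBody lines j) :
    ∃ s ∈ lines, ∃ lang ∈ pvLangs,
      lang.toList <:+: PySem.Chars.lower s.toList ∧ x = pvTitle lang := by
  have hgd : PySem.List.pyGetD lines j "" ∈ lines := by
    rw [PySem.List.pyGetD_eq_getElem lines "" hlo hhi]
    exact List.getElem_mem _
  set s := PySem.List.pyGetD lines j "" with hs
  refine ⟨s, hgd, ?_⟩
  have hstrip : (PySem.Str.strip s).toList <:+: s.toList := by
    rw [PySem.Str.toList_strip]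
    unfold PySem.Chars.strip PySem.Chars.rstrip PySem.Chars.lstrip
    have h1 : List.dropWhile PySem.Chars.isspace s.toList <:+ s.toList := List.dropWhile_suffix _
    have h2 : (List.dropWhile PySem.Chars.isspace
        (List.dropWhile PySem.Chars.isspace s.toList).reverse).reverse <+:
        List.dropWhile PySem.Chars.isspace s.toList := by
      have := List.dropWhile_suffix (l := (List.dropWhile PySem.Chars.isspace s.toList).reverse)
        PySem.Chars.isspace
      have h3 := List.IsSuffix.reverse this
      simpa using h3
    exact List.IsInfix.trans h2.isInfix h1.isInfix
  have hchars : ∀ c ∈ (PySem.Str.strip s).toList, c.toNat < 128 :=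
    fun c hc => hd s hgd c (hstrip.sublist.subset hc)
  unfold pvInnerBody at hx
  rw [← hs] at hx
  split at hx
  · split at hx
    · -- next_line_lower ∈ pvLangs
      rename_i hmem
      simp only [List.mem_singleton] at hx
      refine ⟨PySem.Str.lower (PySem.Str.strip s), hmem, ?_, ?_⟩
      · rw [PySem.Str.toList_lower]
        exact List.IsInfix.map PySem.Chars.lowerChar hstrip
      · rw [hx, pvTitle_lower _ hchars]
    · split at hx
      · -- elif any(...): the inner for-loop over pvLangs
        rw [PySem.List.foldl_append_if] at hx
        simp only [List.nil_append, List.mem_map, List.mem_filter] at hx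
        obtain ⟨lang, ⟨hmem, hin⟩, hxeq⟩ := hx
        refine ⟨lang, hmem, ?_, hxeq.symm⟩
        have hstrip' := hstrip
        rw [PySem.Str.toList_strip] at hstrip'
        have hin' := (PySem.Str.isIn_iff_infix _ _).mp hin
        rw [PySem.Str.toList_lower, PySem.Str.toList_strip] at hin'
        exact hin'.trans
          (by simpa [PySem.Chars.lower] using List.IsInfix.map PySem.Chars.lowerChar hstrip')
      · simp at hx
  · simp at hx

lemma pvMem_method2At {lines : List String} {i : Nat} {x : String}
    (hd : ∀ s ∈ lines, ∀ c ∈ s.toList, c.toNat < 128)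
    (hx : x ∈ pvMethod2At lines i) :
    ∃ s ∈ lines, ∃ lang ∈ pvLangs,
      lang.toList <:+: PySem.Chars.lower s.toList ∧ x = pvTitle lang := by
  unfold pvMethod2At at hx
  rw [PySem.List.foldl_append_eq_flatMap] at hx
  simp only [List.nil_append, List.mem_flatMap] at hx
  obtain ⟨j, hj, hxj⟩ := hx
  have hb := PySem.List.mem_pyRange_one.mp hj
  exact pvMem_innerBody (by omega) (by omega) hd hxj

lemma pvMem_method2 {lines : List String} {x : String} :
    ∀ (l : List String) (i : Nat), x ∈ pvMethod2 lines l i →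
      ∃ i', x ∈ pvMethod2At lines i' := by
  intro l
  induction l with
  | nil => intro i hx; simp [pvMethod2] at hx
  | cons line rest ih =>
      intro i hx
      unfold pvMethod2 at hx
      split at hx
      · exact ⟨i, hx⟩
      · exact ih (i + 1) hx

-- B's scan is a foldl of Set.add over the selected Title names
lemma pvScan_eq (t : String) : ∀ (ps : List (String × String)) (found : PySem.Set String),
    pvScan t ps found =
      ((ps.filter (fun p => PySem.Str.isIn p.1 t)).map Prod.snd).foldl PySem.Set.add found := by
  intro ps
  induction ps with
  | nil => intro found; simp [pvScan]
  | cons p rest ih =>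
      intro found
      obtain ⟨low, name⟩ := p
      simp only [pvScan, ih, List.filter_cons, PySem.Str.isIn]
      by_cases h : PySem.Chars.isIn low.toList t.toList = true
      · simp [h]
      · simp [h]

-- B computes set(titles of the languages occurring in text.lower()) in Method-1 order
lemma pvAlt_eq (text : String) :
    extract_languages_from_text_py_alt text =
      PySem.Set.ofList
        ((pvLangs.filter (fun lang => PySem.Str.isIn lang (PySem.Str.lower text))).map pvTitle) := by
  unfold extract_languages_from_text_py_alt
  rw [pvScan_eq, PySem.Set.ofList_eq_foldl]
  congr 1
  have hp : pvPairs = pvLangs.map (fun l => (l, pvTitle l)) := by decide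
  rw [hp, List.filter_map, List.map_map]
  rfl

-- ===== VERDICT (by name: the statement is the Claim_ definition above) =====
theorem extract_languages_from_text_py_spec : Claim_equal_extract_languages_from_text_py := by
  intro text hdom
  unfold Spec_extract_languages_from_text_py
  unfold extract_languages_from_text_py
  set tl := PySem.Str.lower text with htl
  set lines := (PySem.Str.split? text "\n").getD [] with hlines
  -- every line is an infix of text
  have hline_infix : ∀ s ∈ lines, s.toList <:+: text.toList := by
    intro s hs
    have hbridge := PySem.Str.split?_map text "\n"
    have hsep : ("\n" : String).toList = ['\n'] := by decide
    rw [hsep] at hbridge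
    have hne : PySem.Chars.split? text.toList ['\n'] =
        some (PySem.Chars.splitOn text.toList ['\n']) := by
      simp [PySem.Chars.split?]
    rw [hne] at hbridge
    cases hsplit : PySem.Str.split? text "\n" with
    | none => rw [hsplit] at hbridge; simp at hbridge
    | some L =>
        rw [hsplit] at hbridge
        simp only [Option.map_some, Option.some.injEq] at hbridge
        rw [hlines, hsplit] at hs
        simp only [Option.getD_some] at hs
        have : s.toList ∈ PySem.Chars.splitOn text.toList ['\n'] := by
          rw [← hbridge]
          exact List.mem_map.mpr ⟨s, hs, rfl⟩
        exact pvSplitOn_infix _ _ _ this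
  -- all characters of every line are below 128 (from Dom)
  have hd : ∀ s ∈ lines, ∀ c ∈ s.toList, c.toNat < 128 := by
    intro s hs c hc
    have : c ∈ text.toList := (hline_infix s hs).sublist.subset hc
    have := (List.all_eq_true.mp hdom) c this
    unfold pvDomChar at this
    simp only [Bool.or_eq_true, Bool.and_eq_true, decide_eq_true_eq, beq_iff_eq] at this
    omega
  -- Method 2 only re-adds elements of Method 1
  have hsub : ∀ x ∈ pvMethod2 lines lines 0, x ∈ pvMethod1 tl := by
    intro x hx
    obtain ⟨i', hx'⟩ := pvMem_method2 lines 0 hx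
    obtain ⟨s, hs, lang, hmem, hinf, hxeq⟩ := pvMem_method2At hd hx'
    refine pvMem_method1 lang hmem ?_ hxeq
    rw [PySem.Str.isIn_iff_infix, htl, PySem.Str.toList_lower]
    exact hinf.trans (List.IsInfix.map PySem.Chars.lowerChar (hline_infix s hs))
  -- set(m1 ++ m2) = set(m1) since m2 ⊆ m1
  rw [PySem.Set.ofList_append, PySem.Set.update_eq_append_filter]
  have hnil : List.filter (fun y => !(PySem.Set.ofList (pvMethod1 tl)).contains y)
      (PySem.Set.ofList (pvMethod2 lines lines 0)) = [] := by
    rw [List.filter_eq_nil_iff]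
    intro y hy
    have hy' : y ∈ pvMethod1 tl := hsub y ((PySem.Set.mem_ofList _ _).mp hy)
    simpa using hy'
  rw [hnil, List.append_nil, pvMethod1_eq, pvAlt_eq, ← htl]
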